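-- pv_equiv track=rewrite | github.com/gaby65433/Advent-of-Code | 2023/src/day13.py | part1
-- ===== SOURCE A (Python) =====
-- def all_equal(coisa,i,j):
--     while(i >= 0 and j<len(coisa)):
--         if coisa[i] != coisa[j]:
--             return False
--         i-=1
--         j+=1
--     return True
--
-- def check_equal(lines):
--     for i in range(len(lines)-1):
--         if all_equal(lines,i,i+1):
--             return i+1
--     return 0
--
-- def part1(text):
--     tot = 0
--     patterns = text.split('\n\n')
--     for pattern in patterns:
--         if len(pattern) > 0:
--             lines = pattern.splitlines()
--             cols = []
--             for i in range(len(lines[0])):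
--                 cols.append("".join([row[i] for row in lines]))
--
--             tot += check_equal(lines) * 100 + check_equal(cols)
--
--     return tot
-- ===== SOURCE B (Python) =====
-- def _symbols(rows):
--     # hash each row to the index of its first occurrence, via one dict pass
--     first = {}
--     for i, row in enumerate(rows):
--         if row not in first:
--             first[row] = i
--     return [first[row] for row in rows]
--
-- def _reflect(ids):
--     # a mirror between k-1 and k <=> the even window anchored at the nearer edge
--     # is a palindrome
--     n = len(ids)
--     for k in range(1, n):
--         if ids[k - 1] == ids[k]:
--             w = ids[:2 * k] if 2 * k <= n else ids[2 * k - n:]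
--             if w == w[::-1]:
--                 return k
--     return 0
--
-- def part1(text):
--     total = 0
--     for pattern in text.split('\n\n'):
--         if pattern:
--             rows = pattern.splitlines()
--             cols = [''.join(c) for c in zip(*rows)]
--             total += 100 * _reflect(_symbols(rows)) + _reflect(_symbols(cols))
--     return total
-- ===== Notes on version B (the rewrite author's own statement) =====
-- stated objective: alternative
-- what changed: B interns each row/column to the index of its first occurrence with one dict pass, then tests a split point only when the two interned middle ids match, by comparing a single edge-anchored window of ids with its reversal, instead of A's two-pointer outward expansion comparing strings pairwise at every split point; columns come from zip(*rows) instead of an index-by-index join.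
import Mathlib
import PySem

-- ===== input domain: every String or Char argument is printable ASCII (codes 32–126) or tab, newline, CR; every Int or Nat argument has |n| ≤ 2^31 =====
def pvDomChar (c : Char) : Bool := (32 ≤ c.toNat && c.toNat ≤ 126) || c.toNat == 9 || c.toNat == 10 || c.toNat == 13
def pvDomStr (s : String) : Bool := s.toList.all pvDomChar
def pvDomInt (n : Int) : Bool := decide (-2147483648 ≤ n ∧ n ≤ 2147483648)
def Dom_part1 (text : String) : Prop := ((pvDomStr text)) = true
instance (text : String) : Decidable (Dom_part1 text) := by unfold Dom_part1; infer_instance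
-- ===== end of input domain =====

-- B replaces A's per-split two-pointer mirror expansion over strings by: (1) a dict pass that
-- interns each row/column to the index of its first occurrence, and (2) per split point, only
-- when the two middle ids match, one edge-anchored window of ids compared with its reversal;
-- objective: alternative (a different algorithm of similar cost).

-- ===== PORT A =====

-- while(i >= 0 and j < len(coisa)): …  — fuel bounds the iteration count (≤ len(coisa) for
-- every call A makes); the guard and body are step-for-step A's loop.
def pyAllEqualAux (coisa : List String) (i j : Int) : Nat → Bool
  | 0 => true
  | fuel + 1 =>
    if 0 ≤ i ∧ j < (coisa.length : Int) then
      if PySem.List.pyGet? coisa i ≠ PySem.List.pyGet? coisa j then false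
      else pyAllEqualAux coisa (i - 1) (j + 1) fuel
    else true

def pyAllEqual (coisa : List String) (i j : Int) : Bool :=
  pyAllEqualAux coisa i j coisa.length

-- for i in range(len(lines)-1): if all_equal(lines,i,i+1): return i+1 / return 0
def pyCheckLoop (lines : List String) : List Int → Int
  | [] => 0
  | i :: rest => if pyAllEqual lines i (i + 1) then i + 1 else pyCheckLoop lines rest

def pyCheckEqual (lines : List String) : Int :=
  pyCheckLoop lines (PySem.List.pyRange 0 ((lines.length : Int) - 1) 1)

-- cols built index by index: "".join([row[i] for row in lines]) — row[i] is Str.pyGet?;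
-- the ' ' default is unreachable on Pre_ (Python raises IndexError exactly there).
def pyCols (lines : List String) : List String :=
  (PySem.List.pyRange 0 (PySem.Str.len ((PySem.List.pyGet? lines 0).getD "")) 1).map
    (fun i => String.ofList (lines.map (fun row => (PySem.Str.pyGet? row i).getD ' ')))

def part1 (text : String) : Int :=
  ((PySem.Str.split? text "\n\n").getD []).foldl
    (fun tot pattern =>
      if PySem.Str.len pattern > 0 then
        let lines := PySem.Str.splitlines pattern
        let cols := pyCols lines
        tot + (pyCheckEqual lines * 100 + pyCheckEqual cols)
      else tot) 0

-- ===== PORT B =====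

-- first = {}; for i, row in enumerate(rows): if row not in first: first[row] = i
def altFirst (rows : List String) : PySem.Dict String Int :=
  (PySem.List.enumerate rows).foldl
    (fun d p => if d.contains p.2 then d else d.insert p.2 p.1) PySem.Dict.empty

-- [first[row] for row in rows] — the key is always present (it was inserted at row's
-- first occurrence), so Python's d[row] never raises; the 0 default is unreachable.
def altSymbols (rows : List String) : List Int :=
  rows.map (fun row => (altFirst rows).getD row 0)

-- for k in range(1, n): if ids[k-1] == ids[k]: w = ids[:2*k] if 2*k <= n else ids[2*k-n:];
--   if w == w[::-1]: return k
-- (ids[k-1], ids[k] are in range for k in range(1, n); w[::-1] is w.reverse by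
--  PySem.List.slice?_none_none_neg_one)
def altReflectLoop (ids : List Int) : List Int → Int
  | [] => 0
  | k :: rest =>
    let n : Int := ids.length
    if PySem.List.pyGet? ids (k - 1) == PySem.List.pyGet? ids k then
      let w := if 2 * k ≤ n then PySem.List.slice ids none (some (2 * k))
               else PySem.List.slice ids (some (2 * k - n)) none
      if w == w.reverse then k else altReflectLoop ids rest
    else altReflectLoop ids rest

def altReflect (ids : List Int) : Int :=
  altReflectLoop ids (PySem.List.pyRange 1 (ids.length : Int) 1)

-- zip(*rows): emit heads while every row is nonempty; fuel = length of the first row,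
-- always ≥ the number of emitted columns (= the min row length).
def altZipCols (rows : List (List Char)) : Nat → List (List Char)
  | 0 => []
  | fuel + 1 =>
    if rows ≠ [] ∧ rows.all (fun r => !r.isEmpty) then
      (rows.map (fun r => r.headD ' ')) :: altZipCols (rows.map (fun r => r.tail)) fuel
    else []

-- cols = [''.join(c) for c in zip(*rows)]  (''.join of chars = String.ofList)
def altCols (rows : List String) : List String :=
  (altZipCols (rows.map String.toList) (rows.headD "").length).map String.ofList

def part1_alt (text : String) : Int :=
  ((PySem.Str.split? text "\n\n").getD []).foldl
    (fun total pattern =>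
      if pattern ≠ "" then
        let rows := PySem.Str.splitlines pattern
        total + (100 * altReflect (altSymbols rows) + altReflect (altSymbols (altCols rows)))
      else total) 0

-- ===== PRECONDITION & SPEC =====
-- Pre_ excludes exactly the texts containing a ragged pattern whose later row is shorter than
-- its first row: there A's column builder row[i] raises IndexError (A returns everywhere else).
def Pre_part1 (text : String) : Prop :=
  ∀ p ∈ (PySem.Str.split? text "\n\n").getD [], p ≠ "" →
    ∀ row ∈ PySem.Str.splitlines p,
      PySem.Str.len ((PySem.Str.splitlines p).headD "") ≤ PySem.Str.len row
instance (text : String) : Decidable (Pre_part1 text) := by unfold Pre_part1; infer_instance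

def pvWitness_part1 : String := "#.#\n.#.\n.#.\n\n##\n##"

def Spec_part1 (text : String) (out : Int) : Prop := out = part1_alt text
instance (text : String) (out : Int) : Decidable (Spec_part1 text out) := by unfold Spec_part1; infer_instance

-- ===== CLAIM (what is proved, stated in full; the proofs are below) =====
def Claim_equal_part1 : Prop := ∀ (text : String), Dom_part1 text → Pre_part1 text → Spec_part1 text (part1 text)

-- ===== LEMMAS AND PROOFS =====

theorem pyCheckLoop_cons (l : List String) (i : Int) (rest : List Int) :
    pyCheckLoop l (i :: rest)
      = if pyAllEqual l i (i + 1) then i + 1 else pyCheckLoop l rest := rfl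

theorem pyAllEqualAux_neg (l : List String) :
    ∀ (fuel : Nat) (i j : Int), i < 0 → pyAllEqualAux l i j fuel = true := by
  intro fuel i j hi
  cases fuel with
  | zero => rfl
  | succ f => simp [pyAllEqualAux]; omega

-- A's two-pointer expansion from (a, b) equals the zipped comparison of the reversed
-- prefix ending at a with the suffix starting at b.
theorem pyAllEqualAux_eq_zip (l : List String) :
    ∀ (fuel a b : Nat), a < l.length → (a < fuel ∨ l.length ≤ b + fuel) →
      pyAllEqualAux l (a : Int) (b : Int) fuel
        = (((l.take (a + 1)).reverse.zip (l.drop b)).all (fun p => p.1 == p.2)) := by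
  intro fuel
  induction fuel with
  | zero =>
    intro a b ha hf
    have hb : l.length ≤ b := by omega
    simp [pyAllEqualAux, List.drop_eq_nil_of_le hb]
  | succ f ih =>
    intro a b ha hf
    by_cases hb : b < l.length
    · have hga : (0:Int) ≤ (a:Int) := by omega
      have hgb : ((b:Int)) < (l.length : Int) := by omega
      have hta : l.take (a+1) = l.take a ++ [l[a]] := by
        rw [List.take_add_one]; simp [List.getElem?_eq_getElem ha]
      rw [List.drop_eq_getElem_cons hb]
      simp only [pyAllEqualAux, hta, List.reverse_append, List.reverse_singleton,
        List.singleton_append, List.zip_cons_cons, List.all_cons,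
        PySem.List.pyGet?_natCast, List.getElem?_eq_getElem ha, List.getElem?_eq_getElem hb]
      rw [if_pos ⟨hga, hgb⟩]
      by_cases heq : l[a] = l[b]
      · rw [if_neg (by simp [heq]), heq]
        simp only [beq_self_eq_true, Bool.true_and]
        cases a with
        | zero =>
          have : ((0:Nat):Int) - 1 = -1 := by norm_num
          rw [this, pyAllEqualAux_neg l f (-1) ((b:Int)+1) (by omega)]
          simp
        | succ a' =>
          have h1 : ((Nat.succ a' : Nat):Int) - 1 = (a' : Int) := by push_cast; ring
          have h2 : ((b:Nat):Int) + 1 = ((b+1 : Nat) : Int) := by push_cast; ring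
          rw [h1, h2, ih a' (b+1) (by omega) (by omega)]
      · rw [if_pos (by simp [heq])]
        simp [heq]
    · have hge : ¬ ((0:Int) ≤ (a:Int) ∧ ((b:Int)) < (l.length : Int)) := by
        intro ⟨_, h2⟩; omega
      simp only [pyAllEqualAux]
      rw [if_neg hge, List.drop_eq_nil_of_le (by omega : l.length ≤ b),
          List.zip_nil_right, List.all_nil]

-- zip-all-equal is equality of the mutually truncated lists
theorem zip_all_iff {α : Type} [BEq α] [LawfulBEq α] :
    ∀ (a b : List α),
      (((a.zip b).all (fun p => p.1 == p.2)) = true) ↔ a.take b.length = b.take a.length := by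
  intro a
  induction a with
  | nil => intro b; simp
  | cons x xs ih =>
    intro b
    cases b with
    | nil => simp
    | cons y ys =>
      simp [List.take_succ_cons, ih ys]

-- the interning dict: get? in terms of the first-occurrence index
theorem first_get? :
    ∀ (l : List String) (s : Int) (d : PySem.Dict String Int) (r : String),
      ((PySem.List.enumerate l s).foldl
          (fun d p => if d.contains p.2 then d else d.insert p.2 p.1) d).get? r
        = ((d.get? r).or ((l.findIdx? (fun x => x == r)).map (fun j => s + (j : Int)))) := by
  intro l
  induction l with
  | nil => intro s d r; simp [PySem.List.enumerate_nil]
  | cons x xs ih =>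
    intro s d r
    rw [PySem.List.enumerate_cons, List.foldl_cons, ih]
    change ((if d.contains x = true then d else d.insert x s).get? r).or _ = _
    by_cases hc : d.contains x
    · rw [if_pos hc]
      by_cases hr : x = r
      · subst hr
        have : (d.get? x).isSome := by rw [← PySem.Dict.contains_eq_isSome_get?]; exact hc
        obtain ⟨v, hv⟩ := Option.isSome_iff_exists.mp this
        simp [hv, List.findIdx?_cons]
      · rw [List.findIdx?_cons]
        have : (x == r) = false := by simp [hr]
        rw [this]
        cases hdr : d.get? r with
        | some v => simp
        | none =>
          simp only [Option.none_or]
          cases hfi : xs.findIdx? (fun y => y == r) with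
          | none => simp
          | some j => (simp; try omega)
    · rw [if_neg hc]
      by_cases hr : r = x
      · subst hr
        have hdr : d.get? r = none := by
          rw [PySem.Dict.get?_eq_none_iff_contains]; simpa using hc
        rw [PySem.Dict.get?_insert]
        simp [hdr, List.findIdx?_cons]
      · rw [PySem.Dict.get?_insert, if_neg hr, List.findIdx?_cons]
        have : (x == r) = false := by simp; exact fun h => hr h.symm
        rw [this]
        cases hdr : d.get? r with
        | some v => simp
        | none =>
          simp only [Option.none_or]
          cases hfi : xs.findIdx? (fun y => y == r) with
          | none => simp
          | some j => (simp; try omega)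

theorem symbol_eq (l : List String) (r : String) (hr : r ∈ l) :
    (altFirst l).getD r 0 = ((l.findIdx (fun x => x == r) : Nat) : Int) := by
  have hlt : l.findIdx (fun x => x == r) < l.length :=
    List.findIdx_lt_length_of_exists ⟨r, hr, by simp⟩
  have hfi : l.findIdx? (fun x => x == r) = some (l.findIdx (fun x => x == r)) :=
    List.findIdx?_eq_some_iff_findIdx_eq.mpr ⟨hlt, rfl⟩
  rw [PySem.Dict.getD_eq_get?_getD, altFirst, first_get? l 0 PySem.Dict.empty r]
  simp [hfi]

-- the first-occurrence index is injective on the members of l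
theorem symbol_inj (l : List String) (x y : String) (hx : x ∈ l) (hy : y ∈ l)
    (h : (altFirst l).getD x 0 = (altFirst l).getD y 0) : x = y := by
  rw [symbol_eq l x hx, symbol_eq l y hy] at h
  have hj : l.findIdx (fun z => z == x) = l.findIdx (fun z => z == y) := by exact_mod_cast h
  have hltx : l.findIdx (fun z => z == x) < l.length :=
    List.findIdx_lt_length_of_exists ⟨x, hx, by simp⟩
  have hlty : l.findIdx (fun z => z == y) < l.length :=
    List.findIdx_lt_length_of_exists ⟨y, hy, by simp⟩
  have hgx : (l[l.findIdx (fun z => z == x)] == x) = true := List.findIdx_getElem (w := hltx)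
  have hgy : (l[l.findIdx (fun z => z == y)] == y) = true := List.findIdx_getElem (w := hlty)
  rw [beq_iff_eq] at hgx hgy
  have hg := congrArg (fun t => l[t]?) hj
  simp only [List.getElem?_eq_getElem hltx, List.getElem?_eq_getElem hlty] at hg
  rw [← hgx, ← hgy]
  exact Option.some.inj hg

-- even window anchored at the nearer edge is a palindrome ↔ truncated-halves equality
theorem pal_iff {α : Type} (l : List α) (k : Nat) (hk : k < l.length) :
    ((if 2*k ≤ l.length then l.take (2*k) else l.drop (2*k - l.length)) =
     (if 2*k ≤ l.length then l.take (2*k) else l.drop (2*k - l.length)).reverse)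
    ↔ (l.take k).reverse.take (l.length - k) = (l.drop k).take k := by
  by_cases h2 : 2*k ≤ l.length
  · rw [if_pos h2]
    have hu : (l.take k).length = k := by simp; omega
    have hv : ((l.drop k).take k).length = k := by simp; omega
    have ht : l.take (2*k) = l.take k ++ (l.drop k).take k := by
      rw [two_mul, List.take_add]
    have htk : (l.take k).reverse.take (l.length - k) = (l.take k).reverse :=
      List.take_of_length_le (by simp; omega)
    rw [ht, List.reverse_append, htk]
    constructor
    · intro h
      have := (List.append_inj h (by rw [hu, List.length_reverse, hv])).1
      rw [this, List.reverse_reverse]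
    · intro h
      rw [← h, List.reverse_reverse]
  · rw [if_neg h2]
    have hk2 : l.length < 2*k := by omega
    have hsplit : l.drop (2*k - l.length) = (l.take k).drop (2*k - l.length) ++ l.drop k := by
      have h := List.drop_append_of_le_length
        (l₁ := l.take k) (l₂ := l.drop k) (i := 2*k - l.length) (by simp; omega)
      rw [List.take_append_drop] at h
      exact h
    have hA : ((l.take k).drop (2*k - l.length)).length = l.length - k := by simp; omega
    have hB : (l.drop k).length = l.length - k := by simp
    have hbk : (l.drop k).take k = l.drop k := List.take_of_length_le (by simp; omega)
    have hak : (l.take k).reverse.take (l.length - k)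
        = ((l.take k).drop (2*k - l.length)).reverse := by
      rw [List.take_reverse]
      congr 2
      simp; omega
    rw [hsplit, List.reverse_append, hbk, hak]
    constructor
    · intro h
      have := (List.append_inj h (by rw [hA, List.length_reverse, hB])).1
      rw [this, List.reverse_reverse]
    · intro h
      rw [← h, List.reverse_reverse]
  -- (both branches reduce to A = v.reverse with equal-length halves)

-- a list of images under an on-members-injective map is a palindrome iff the list is
theorem map_pal {α β : Type} (f : α → β) (w : List α)
    (hinj : ∀ x ∈ w, ∀ y ∈ w, f x = f y → x = y) :
    (w.map f = (w.map f).reverse) ↔ (w = w.reverse) := by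
  constructor
  · intro h
    apply List.ext_getElem (by simp)
    intro i h1 h2
    rw [← List.map_reverse] at h
    have := congrArg (fun t => t[i]?) h
    simp only [List.getElem?_map] at this
    rw [List.getElem?_eq_getElem h1, List.getElem?_eq_getElem h2] at this
    simp only [Option.map_some] at this
    exact hinj _ (List.getElem_mem h1) _ (by
      have := List.getElem_mem h2; rwa [List.mem_reverse] at this)
      (Option.some.inj this)
  · intro h
    rw [← List.map_reverse, ← h]

-- per split point: A's mirror test = B's id-window palindrome test
theorem check_iff (l : List String) (a : Nat) (ha : a + 1 < l.length) :
    pyAllEqual l (a : Int) ((a : Int) + 1)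
      = (let ids := altSymbols l
         let n : Int := ids.length
         let w := if 2 * ((a:Int)+1) ≤ n then PySem.List.slice ids none (some (2 * ((a:Int)+1)))
                  else PySem.List.slice ids (some (2 * ((a:Int)+1) - n)) none
         (w == w.reverse)) := by
  have hlen : (altSymbols l).length = l.length := by simp [altSymbols]
  have hcast : ((a:Int)) + 1 = ((a + 1 : Nat) : Int) := by push_cast; ring
  -- reduce B's Int slices to the Nat window
  have hw : (if 2 * ((a:Int)+1) ≤ ((altSymbols l).length : Int)
               then PySem.List.slice (altSymbols l) none (some (2 * ((a:Int)+1)))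
               else PySem.List.slice (altSymbols l) (some (2 * ((a:Int)+1) - ((altSymbols l).length : Int))) none)
      = (if 2*(a+1) ≤ l.length then (altSymbols l).take (2*(a+1))
         else (altSymbols l).drop (2*(a+1) - l.length)) := by
    rw [hlen]
    by_cases h2 : 2*(a+1) ≤ l.length
    · have ht : (2 * ((a:Int)+1)).toNat = 2*(a+1) := by omega
      rw [if_pos (by exact_mod_cast h2), if_pos h2,
        PySem.List.slice_to _ (by omega), ht]
    · have ht : (2 * ((a:Int)+1) - (l.length : Int)).toNat = 2*(a+1) - l.length := by omega
      rw [if_neg (by omega), if_neg h2,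
        PySem.List.slice_from _ (by omega), ht]
  simp only []
  rw [hw]
  -- B's window over ids is the map of the window over rows
  have hmap : (if 2*(a+1) ≤ l.length then (altSymbols l).take (2*(a+1))
               else (altSymbols l).drop (2*(a+1) - l.length))
      = (if 2*(a+1) ≤ l.length then l.take (2*(a+1))
         else l.drop (2*(a+1) - l.length)).map (fun r => (altFirst l).getD r 0) := by
    by_cases h2 : 2*(a+1) ≤ l.length <;>
      simp [h2, altSymbols, List.map_take, List.map_drop]
  rw [hmap]
  -- A's side as the zip test
  rw [pyAllEqual, hcast, pyAllEqualAux_eq_zip l l.length a (a+1) (by omega) (Or.inl (by omega))]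
  -- both sides as propositions
  rw [Bool.eq_iff_iff, beq_iff_eq, zip_all_iff]
  have hmem : ∀ x ∈ (if 2*(a+1) ≤ l.length then l.take (2*(a+1))
                     else l.drop (2*(a+1) - l.length)), x ∈ l := by
    intro x hx
    by_cases h2 : 2*(a+1) ≤ l.length
    · rw [if_pos h2] at hx; exact List.mem_of_mem_take hx
    · rw [if_neg h2] at hx; exact List.mem_of_mem_drop hx
  rw [map_pal _ _ (fun x hx y hy => symbol_inj l x y (hmem x hx) (hmem y hy)),
    pal_iff l (a+1) ha]
  have h1 : (l.drop (a+1)).length = l.length - (a+1) := by simp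
  have h2 : (l.take (a+1)).reverse.length = a + 1 := by simp; omega
  rw [h1, h2]

theorem altReflectLoop_cons (ids : List Int) (k : Int) (rest : List Int) :
    altReflectLoop ids (k :: rest)
      = (let n : Int := ids.length
         if PySem.List.pyGet? ids (k - 1) == PySem.List.pyGet? ids k then
           let w := if 2 * k ≤ n then PySem.List.slice ids none (some (2 * k))
                    else PySem.List.slice ids (some (2 * k - n)) none
           if w == w.reverse then k else altReflectLoop ids rest
         else altReflectLoop ids rest) := rfl

-- a successful mirror test implies its two middle rows are equal (A's loop checks them first)
theorem allEqual_mid (l : List String) (a : Nat) (ha : a + 1 < l.length)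
    (h : pyAllEqual l (a : Int) ((a : Int) + 1) = true) : l[a]'(by omega) = l[a+1]'ha := by
  rw [pyAllEqual] at h
  obtain ⟨f, hf⟩ : ∃ f, l.length = f + 1 := ⟨l.length - 1, by omega⟩
  rw [hf, pyAllEqualAux, if_pos ⟨by omega, by omega⟩] at h
  · by_cases heq : PySem.List.pyGet? l (a : Int) ≠ PySem.List.pyGet? l ((a : Int) + 1)
    · rw [if_pos heq] at h
      exact absurd h (by simp)
    · rw [not_not] at heq
      have hcast : ((a : Int)) + 1 = ((a + 1 : Nat) : Int) := by push_cast; ring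
      rw [hcast, PySem.List.pyGet?_natCast, PySem.List.pyGet?_natCast,
        List.getElem?_eq_getElem (by omega), List.getElem?_eq_getElem ha] at heq
      exact Option.some.inj heq

theorem scan_eq (l : List String) :
    ∀ (m a : Nat), l.length ≤ a + m + 1 →
      pyCheckLoop l (PySem.List.pyRange a ((l.length : Int) - 1) 1)
        = altReflectLoop (altSymbols l) (PySem.List.pyRange ((a : Int) + 1) ((altSymbols l).length : Int) 1) := by
  have hlen : (altSymbols l).length = l.length := by simp [altSymbols]
  rw [hlen]
  intro m
  induction m with
  | zero =>
    intro a hm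
    rw [PySem.List.pyRange_one_eq_nil (by omega),
        PySem.List.pyRange_one_eq_nil (by omega)]
    rfl
  | succ m ih =>
    intro a hm
    by_cases ha : (a : Int) < (l.length : Int) - 1
    · have ha2 : (a : Int) + 1 < (l.length : Int) := by omega
      rw [PySem.List.pyRange_one_cons ha, PySem.List.pyRange_one_cons ha2,
          pyCheckLoop_cons, altReflectLoop_cons]
      simp only [hlen]
      have hrec : pyCheckLoop l (PySem.List.pyRange ((a:Int) + 1) ((l.length : Int) - 1) 1)
          = altReflectLoop (altSymbols l) (PySem.List.pyRange ((a:Int) + 1 + 1) (l.length : Int) 1) := by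
        have h1 : ((a:Int)) + 1 = ((a + 1 : Nat) : Int) := by push_cast; ring
        rw [h1]
        exact ih (a+1) (by omega)
      have hmidGet : PySem.List.pyGet? (altSymbols l) ((a:Int) + 1 - 1)
            = some ((altFirst l).getD (l[a]'(by omega)) 0)
          ∧ PySem.List.pyGet? (altSymbols l) ((a:Int) + 1)
            = some ((altFirst l).getD (l[a+1]'(by omega)) 0) := by
        constructor
        · have : ((a:Int)) + 1 - 1 = ((a : Nat) : Int) := by ring
          rw [this, PySem.List.pyGet?_natCast]
          simp [altSymbols, List.getElem?_eq_getElem (show a < l.length by omega)]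
        · have : ((a:Int)) + 1 = ((a + 1 : Nat) : Int) := by push_cast; ring
          rw [this, PySem.List.pyGet?_natCast]
          simp [altSymbols, List.getElem?_eq_getElem (show a + 1 < l.length by omega)]
      by_cases hA : pyAllEqual l (a : Int) ((a : Int) + 1) = true
      · have hmid : l[a]'(by omega) = l[a+1]'(by omega) := allEqual_mid l a (by omega) hA
        rw [if_pos hA]
        rw [hmidGet.1, hmidGet.2, hmid]
        rw [if_pos (by simp)]
        have hpal := check_iff l a (show a + 1 < l.length by omega)
        rw [hA] at hpal
        simp only [hlen] at hpal
        rw [if_pos hpal.symm]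
      · rw [if_neg hA]
        have hpal := check_iff l a (show a + 1 < l.length by omega)
        rw [Bool.not_eq_true] at hA
        rw [hA] at hpal
        simp only [hlen] at hpal
        by_cases hm : (PySem.List.pyGet? (altSymbols l) ((a:Int) + 1 - 1)
            == PySem.List.pyGet? (altSymbols l) ((a:Int) + 1)) = true
        · rw [if_pos hm, if_neg (by rw [← hpal]; simp)]
          exact hrec
        · rw [if_neg hm]
          exact hrec
    · rw [PySem.List.pyRange_one_eq_nil (by omega), PySem.List.pyRange_one_eq_nil (by omega)]
      rfl

theorem check_eq_reflect (l : List String) : pyCheckEqual l = altReflect (altSymbols l) := by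
  have h := scan_eq l l.length 0 (by omega)
  have hlen : (altSymbols l).length = l.length := by simp [altSymbols]
  simpa [pyCheckEqual, altReflect, hlen] using h

theorem altZipCols_spec :
    ∀ (w : Nat) (rows : List (List Char)), rows ≠ [] → (∀ r ∈ rows, w ≤ r.length) →
      altZipCols rows w
        = (List.range w).map (fun i => rows.map (fun r => r[i]?.getD ' ')) := by
  intro w
  induction w with
  | zero => intro rows _ _; rfl
  | succ w ih =>
    intro rows hne hlen
    have hall : rows.all (fun r => !r.isEmpty) = true := by
      simp only [List.all_eq_true]
      intro r hr
      have := hlen r hr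
      simp
      intro h; subst h; simp at this
    rw [altZipCols, if_pos ⟨hne, hall⟩]
    rw [ih (rows.map (fun r => r.tail)) (by simpa using hne)
        (by intro r hr; simp at hr; obtain ⟨s, hs, rfl⟩ := hr
            have := hlen s hs; simp [List.length_tail]; omega)]
    rw [List.range_succ_eq_map]
    simp only [List.map_cons, List.map_map]
    congr 1
    · congr 1; funext r
      rw [List.headD_eq_head?, List.head?_eq_getElem?]
    · apply List.map_congr_left
      intro i _
      simp [List.getElem?_tail, Function.comp]

theorem cols_eq (lines : List String)
    (h : ∀ row ∈ lines, PySem.Str.len (lines.headD "") ≤ PySem.Str.len row) :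
    pyCols lines = altCols lines := by
  cases lines with
  | nil => rfl
  | cons hd tl =>
    have hw : ∀ row ∈ hd :: tl, hd.length ≤ row.toList.length := by
      intro row hrow
      have := h row hrow
      simp only [List.headD_cons, PySem.Str.len_eq] at this
      have hl : hd.toList.length = hd.length := String.length_toList
      omega
    rw [pyCols, altCols]
    have hg : (PySem.List.pyGet? (hd :: tl) (0:Int)).getD "" = hd := by
      simp
    rw [hg, PySem.Str.len_eq, PySem.List.pyRange_zero_nat]
    have hlen2 : hd.toList.length = hd.length := String.length_toList
    rw [List.headD_cons,
        altZipCols_spec hd.length ((hd :: tl).map String.toList) (by simp)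
          (by intro r hr
              rw [List.mem_map] at hr
              obtain ⟨s, hs, hrfl⟩ := hr
              subst hrfl
              exact hw s hs)]
    simp only [List.map_map, hlen2]
    apply List.map_congr_left
    intro i _
    simp [Function.comp_def]

-- ===== VERDICT (by name: the statement is the Claim_ definition above) =====
theorem part1_spec : Claim_equal_part1 := by
  intro text _ hpre
  unfold Spec_part1 part1 part1_alt
  apply PySem.List.foldl_congr_mem
  intro acc p hp
  by_cases hp0 : p = ""
  · subst hp0
    simp [PySem.Str.len_eq]
  · have hlen : PySem.Str.len p > 0 := by
      rw [PySem.Str.len_eq]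
      have : p.toList ≠ [] := by simpa [String.toList_eq_nil_iff] using hp0
      have := List.length_pos_of_ne_nil this
      omega
    rw [if_pos hlen, if_pos hp0]
    simp only []
    rw [check_eq_reflect, check_eq_reflect, cols_eq (PySem.Str.splitlines p) (hpre p hp hp0)]
    ring
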